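-- pv_equiv track=rewrite | github.com/xiyuan27/font_seeker | get_segments.py | scan_image
-- ===== SOURCE A (Python) =====
-- def first_black(width, height, columns, current_col):
--
-- 	while current_col < width:
-- 		if columns[current_col].count(0) >= 1:
-- 			return current_col
-- 		else:
-- 			current_col +=1
--
-- def all_white(width, height, columns, current_col):
--
-- 	while current_col < width:
-- 		if columns[current_col].count(255) == height:
-- 			return current_col
-- 		else:
-- 			current_col +=1
--
-- 	return current_col
--
-- def scan_image(width, height, columns):
-- 	"""Finds vertical projection of image"""
-- 	boundaries = []
-- 	current_col = 0
--
-- 	while current_col < width and current_col != None: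
--
--
-- 		next_col = first_black(width, height, columns, current_col)
-- 		if next_col == None:
-- 			break # there is no black - prevents infinite loop
--
-- 		if next_col != None: # if there is black, add and move on
-- 			boundaries.append(next_col)
-- 			current_col = next_col
--
-- 			white_col = all_white(width, height, columns, current_col) # change looking for to white
-- 			if white_col != None: # if there is an all white column
-- 				boundaries.append(white_col)
-- 				current_col = white_col # reset starting point for scanning
--
-- 	# slices = [(x, 0) for x in boundaries if x!= None] # a list of tuples, (x,y) where splits are
-- 	return boundaries
-- ===== SOURCE B (Python) =====
-- def scan_image(width, height, columns):
-- 	"""Finds vertical projection of image"""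
-- 	boundaries = []
-- 	seeking_black = True
-- 	for i in range(width):
-- 		col = columns[i]
-- 		if seeking_black:
-- 			if 0 in col:
-- 				boundaries.append(i)
-- 				seeking_black = False
-- 		elif col.count(255) == height:
-- 			boundaries.append(i)
-- 			seeking_black = True
-- 	if not seeking_black:
-- 		boundaries.append(width)
-- 	return boundaries
-- ===== Notes on version B (the rewrite author's own statement) =====
-- stated objective: simpler
-- what changed: Replaced A's outer while-loop calling two helper scan functions (first_black / all_white) by one left-to-right pass over the column indices with a single boolean state 'seeking_black', appending width at the end when no all-white column followed the last black one.
import Mathlib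
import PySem

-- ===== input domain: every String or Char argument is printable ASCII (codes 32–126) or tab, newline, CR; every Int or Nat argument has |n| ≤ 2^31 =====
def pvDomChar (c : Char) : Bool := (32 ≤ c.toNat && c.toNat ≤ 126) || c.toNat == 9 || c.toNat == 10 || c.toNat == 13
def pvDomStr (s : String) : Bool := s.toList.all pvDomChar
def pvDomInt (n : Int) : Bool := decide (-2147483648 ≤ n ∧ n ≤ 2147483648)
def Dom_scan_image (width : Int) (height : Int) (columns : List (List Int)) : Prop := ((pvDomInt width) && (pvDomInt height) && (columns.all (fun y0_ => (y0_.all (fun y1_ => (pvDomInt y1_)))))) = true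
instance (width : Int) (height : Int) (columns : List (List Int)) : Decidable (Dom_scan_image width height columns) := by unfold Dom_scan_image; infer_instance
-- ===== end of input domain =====

-- B replaces A's outer while-loop over two helper scan functions by one single-pass
-- left-to-right loop with a boolean 'seeking_black' state (objective: simpler).

-- ===== PORT A =====
-- Pre_scan_image guarantees every index reached is in range, so xs[i] is ported with
-- pyGetD (default []); the fuel of scanLoopA makes the while-loop total in Lean — under
-- Pre_scan_image the fuel is never exhausted (current_col strictly increases each round).
def first_black (width height : Int) (columns : List (List Int)) (current_col : Int) : Option Int :=
  if current_col < width then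
    if (PySem.List.pyGetD columns current_col []).count 0 ≥ 1 then some current_col
    else first_black width height columns (current_col + 1)
  else none
termination_by (width - current_col).toNat
decreasing_by omega

def all_white (width height : Int) (columns : List (List Int)) (current_col : Int) : Int :=
  if current_col < width then
    if (PySem.List.pyGetD columns current_col []).count 255 = height then current_col
    else all_white width height columns (current_col + 1)
  else current_col
termination_by (width - current_col).toNat
decreasing_by omega

def scanLoopA (width height : Int) (columns : List (List Int)) :
    Nat → Int → List Int → List Int
  | 0, _, boundaries => boundaries
  | fuel + 1, current_col, boundaries =>
    if current_col < width then
      match first_black width height columns current_col with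
      | none => boundaries
      | some next_col =>
        let boundaries := boundaries ++ [next_col]
        let white_col := all_white width height columns next_col
        scanLoopA width height columns fuel white_col (boundaries ++ [white_col])
    else boundaries

def scan_image (width : Int) (height : Int) (columns : List (List Int)) : List Int :=
  scanLoopA width height columns (width.toNat + 1) 0 []

-- ===== PORT B =====
def altStep (height : Int) (columns : List (List Int)) (st : List Int × Bool) (i : Int) :
    List Int × Bool :=
  let col := PySem.List.pyGetD columns i []
  if st.2 then
    if 0 ∈ col then (st.1 ++ [i], false) else st
  else if col.count 255 = height then (st.1 ++ [i], true) else st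

def scan_image_alt (width : Int) (height : Int) (columns : List (List Int)) : List Int :=
  let r := (PySem.List.pyRange 0 width 1).foldl (altStep height columns) ([], true)
  if r.2 then r.1 else r.1 ++ [width]

-- ===== PRECONDITION & SPEC =====
-- Pre_ excludes exactly the inputs where Python A does not return normally:
-- width > len(columns) makes A's scan index out of range (IndexError), and a column
-- before width that both contains a 0 and has count(255) == height pins A's while-loop
-- to that column forever (first_black and all_white both return it), so A diverges.
def Pre_scan_image (width : Int) (height : Int) (columns : List (List Int)) : Prop :=
  width ≤ (columns.length : Int) ∧
    ∀ c ∈ columns.take width.toNat, ¬(0 ∈ c ∧ c.count 255 = height)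
instance (width : Int) (height : Int) (columns : List (List Int)) :
    Decidable (Pre_scan_image width height columns) := by unfold Pre_scan_image; infer_instance

def pvWitness_scan_image : Int × Int × List (List Int) := (2, 1, [[0], [255]])

def Spec_scan_image (width : Int) (height : Int) (columns : List (List Int)) (out : List Int) : Prop := out = scan_image_alt width height columns
instance (width : Int) (height : Int) (columns : List (List Int)) (out : List Int) : Decidable (Spec_scan_image width height columns out) := by unfold Spec_scan_image; infer_instance

-- ===== CLAIM (what is proved, stated in full; the proofs are below) =====
def Claim_equal_scan_image : Prop := ∀ (width : Int) (height : Int) (columns : List (List Int)), Dom_scan_image width height columns → Pre_scan_image width height columns → Spec_scan_image width height columns (scan_image width height columns)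

-- ===== LEMMAS AND PROOFS =====

-- Proof-side state machine: B's fold over range(width), unrolled as a recursion on the index.
def pvF (width height : Int) (columns : List (List Int)) (c : Int) (st : List Int × Bool) :
    List Int × Bool :=
  if c < width then pvF width height columns (c + 1) (altStep height columns st c) else st
termination_by (width - c).toNat
decreasing_by omega

def pvFinalize (width : Int) (st : List Int × Bool) : List Int :=
  if st.2 then st.1 else st.1 ++ [width]

lemma foldl_range_eq_pvF (width height : Int) (columns : List (List Int)) :
    ∀ (k : Nat) (c : Int), (width - c).toNat ≤ k → ∀ st,
      (PySem.List.pyRange c width 1).foldl (altStep height columns) st =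
        pvF width height columns c st := by
  intro k
  induction k with
  | zero =>
    intro c hc st
    rw [PySem.List.pyRange_one_eq_nil (by omega), pvF]
    simp; omega
  | succ k ih =>
    intro c hc st
    by_cases h : c < width
    · rw [PySem.List.pyRange_one_cons h, pvF, if_pos h]
      simpa using ih (c + 1) (by omega) _
    · rw [PySem.List.pyRange_one_eq_nil (by omega), pvF, if_neg h]
      simp

lemma scan_image_alt_eq (width height : Int) (columns : List (List Int)) :
    scan_image_alt width height columns =
      pvFinalize width (pvF width height columns 0 ([], true)) := by
  rw [scan_image_alt,
    foldl_range_eq_pvF width height columns (width - 0).toNat 0 le_rfl ([], true)]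
  rfl

lemma col_mem_take (width : Int) (columns : List (List Int)) {i : Int}
    (hw : width ≤ (columns.length : Int)) (h0 : 0 ≤ i) (hiw : i < width) :
    PySem.List.pyGetD columns i [] ∈ columns.take width.toNat := by
  have h := PySem.List.pyGetD_eq_getElem (xs := columns) (i := i) (d := []) h0 (by omega)
  rw [h]
  exact List.mem_take_iff_getElem.mpr ⟨i.toNat, by omega, rfl⟩

lemma fb_none (width height : Int) (columns : List (List Int)) :
    ∀ (k : Nat) (c : Int), (width - c).toNat ≤ k →
      first_black width height columns c = none → ∀ acc,
      pvF width height columns c (acc, true) = (acc, true) := by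
  intro k
  induction k with
  | zero =>
    intro c hc _ acc
    rw [pvF, if_neg (by omega)]
  | succ k ih =>
    intro c hc hfb acc
    by_cases h : c < width
    · rw [first_black, if_pos h] at hfb
      rw [pvF, if_pos h]
      by_cases hb : (PySem.List.pyGetD columns c []).count 0 ≥ 1
      · rw [if_pos hb] at hfb; exact absurd hfb (by simp)
      · rw [if_neg hb] at hfb
        have hnm : ¬ 0 ∈ PySem.List.pyGetD columns c [] := by
          intro hm; exact hb (List.count_pos_iff.mpr hm)
        have hstep : altStep height columns (acc, true) c = (acc, true) := by
          simp [altStep, hnm]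
        rw [hstep]
        exact ih (c + 1) (by omega) hfb acc
    · rw [pvF, if_neg h]

lemma fb_some (width height : Int) (columns : List (List Int)) :
    ∀ (k : Nat) (c n : Int), (width - c).toNat ≤ k → 0 ≤ c →
      first_black width height columns c = some n →
      c ≤ n ∧ n < width ∧ 0 ≤ n ∧ 0 ∈ PySem.List.pyGetD columns n [] ∧
      ∀ acc, pvF width height columns c (acc, true) =
        pvF width height columns (n + 1) (acc ++ [n], false) := by
  intro k
  induction k with
  | zero =>
    intro c n hc h0 hfb
    rw [first_black, if_neg (by omega)] at hfb
    exact absurd hfb (by simp)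
  | succ k ih =>
    intro c n hc h0 hfb
    by_cases h : c < width
    · rw [first_black, if_pos h] at hfb
      by_cases hb : (PySem.List.pyGetD columns c []).count 0 ≥ 1
      · rw [if_pos hb] at hfb
        have hcn : c = n := by simpa using hfb
        subst hcn
        refine ⟨le_rfl, h, h0, List.count_pos_iff.mp (by omega), ?_⟩
        intro acc
        rw [pvF, if_pos h]
        have hmem : 0 ∈ PySem.List.pyGetD columns c [] := List.count_pos_iff.mp (by omega)
        have hstep : altStep height columns (acc, true) c = (acc ++ [c], false) := by
          simp [altStep, hmem]
        rw [hstep]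
      · rw [if_neg hb] at hfb
        obtain ⟨h1, h2, h3, h4, h5⟩ := ih (c + 1) n (by omega) (by omega) hfb
        refine ⟨by omega, h2, h3, h4, ?_⟩
        intro acc
        rw [pvF, if_pos h]
        have hnm : ¬ 0 ∈ PySem.List.pyGetD columns c [] := by
          intro hm; exact hb (List.count_pos_iff.mpr hm)
        have hstep : altStep height columns (acc, true) c = (acc, true) := by
          simp [altStep, hnm]
        rw [hstep]
        exact h5 acc
    · rw [first_black, if_neg h] at hfb
      exact absurd hfb (by simp)

lemma aw_lemma (width height : Int) (columns : List (List Int)) :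
    ∀ (k : Nat) (c : Int), (width - c).toNat ≤ k → c ≤ width →
      (all_white width height columns c < width →
        c ≤ all_white width height columns c ∧
        (PySem.List.pyGetD columns (all_white width height columns c) []).count 255 = height ∧
        ∀ acc, pvF width height columns c (acc, false) =
          pvF width height columns (all_white width height columns c + 1)
            (acc ++ [all_white width height columns c], true)) ∧
      (¬ all_white width height columns c < width →
        all_white width height columns c = width ∧
        ∀ acc, pvF width height columns c (acc, false) = (acc, false)) := by
  intro k
  induction k with
  | zero =>
    intro c hc hcw
    have hcw' : c = width := by omega
    subst hcw'
    rw [all_white, if_neg (by omega)]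
    exact ⟨fun h => absurd h (by omega), fun _ => ⟨rfl, fun acc => by rw [pvF, if_neg (by omega)]⟩⟩
  | succ k ih =>
    intro c hc hcw
    by_cases h : c < width
    · rw [all_white, if_pos h]
      by_cases hwht : (PySem.List.pyGetD columns c []).count 255 = height
      · rw [if_pos hwht]
        refine ⟨fun _ => ⟨le_rfl, hwht, ?_⟩, fun hh => absurd h hh⟩
        intro acc
        rw [pvF, if_pos h]
        have hstep : altStep height columns (acc, false) c = (acc ++ [c], true) := by
          simp [altStep, hwht]
        rw [hstep]
      · rw [if_neg hwht]
        obtain ⟨hlt, hge⟩ := ih (c + 1) (by omega) (by omega)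
        have hstep : ∀ acc, altStep height columns (acc, false) c = (acc, false) := by
          intro acc
          simp [altStep, hwht]
        constructor
        · intro hm
          obtain ⟨h1, h2, h3⟩ := hlt hm
          refine ⟨by omega, h2, ?_⟩
          intro acc
          rw [pvF, if_pos h, hstep]
          exact h3 acc
        · intro hm
          obtain ⟨h1, h2⟩ := hge hm
          refine ⟨h1, ?_⟩
          intro acc
          rw [pvF, if_pos h, hstep]
          exact h2 acc
    · rw [all_white, if_neg h]
      exact ⟨fun hh => absurd hh (by omega),
        fun _ => ⟨by omega, fun acc => by rw [pvF, if_neg h]⟩⟩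

lemma main_sim (width height : Int) (columns : List (List Int))
    (hw : width ≤ (columns.length : Int))
    (hsep : ∀ c ∈ columns.take width.toNat, ¬(0 ∈ c ∧ c.count 255 = height)) :
    ∀ (fuel : Nat) (c : Int) (acc : List Int), 0 ≤ c → (width - c).toNat < fuel →
      scanLoopA width height columns fuel c acc =
        pvFinalize width (pvF width height columns c (acc, true)) := by
  intro fuel
  induction fuel with
  | zero => intro c acc _ hf; omega
  | succ fuel ih =>
    intro c acc h0 hf
    by_cases h : c < width
    · cases hfb : first_black width height columns c with
      | none =>
        rw [scanLoopA, if_pos h, hfb]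
        rw [fb_none width height columns (width - c).toNat c le_rfl hfb acc, pvFinalize]
        simp
      | some n =>
        rw [scanLoopA, if_pos h, hfb]
        show scanLoopA width height columns fuel (all_white width height columns n)
            ((acc ++ [n]) ++ [all_white width height columns n]) =
          pvFinalize width (pvF width height columns c (acc, true))
        obtain ⟨hcn, hnw, hn0, hblack, hFstep⟩ :=
          fb_some width height columns (width - c).toNat c n le_rfl h0 hfb
        -- the black column n is not all-white (Pre_), so all_white moves past n
        have hnotwhite : ¬ (PySem.List.pyGetD columns n []).count 255 = height := by
          intro hwht
          exact hsep _ (col_mem_take width columns hw hn0 hnw) ⟨hblack, hwht⟩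
        have haw : all_white width height columns n =
            all_white width height columns (n + 1) := by
          rw [all_white, if_pos hnw, if_neg hnotwhite]
        set m := all_white width height columns n with hm
        obtain ⟨hlt, hge⟩ := aw_lemma width height columns
          (width - (n + 1)).toNat (n + 1) le_rfl (by omega)
        rw [← haw] at hlt hge
        by_cases hmw : m < width
        · obtain ⟨hnm, hmwht, hFaw⟩ := hlt hmw
          have hmnotblack : ¬ 0 ∈ PySem.List.pyGetD columns m [] := by
            intro hmem
            exact hsep _ (col_mem_take width columns hw (by omega) hmw) ⟨hmem, hmwht⟩
          have hbridge : pvF width height columns m (acc ++ [n] ++ [m], true) =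
              pvF width height columns (m + 1) (acc ++ [n] ++ [m], true) := by
            rw [pvF, if_pos hmw]
            have hstep : altStep height columns (acc ++ [n] ++ [m], true) m =
                (acc ++ [n] ++ [m], true) := by
              simp [altStep, hmnotblack]
            rw [hstep]
          rw [ih m (acc ++ [n] ++ [m]) (by omega) (by omega), hFstep acc, hFaw (acc ++ [n]),
            ← hbridge]
        · obtain ⟨hmeq, hFaw⟩ := hge hmw
          rw [ih m (acc ++ [n] ++ [m]) (by omega) (by omega), hFstep acc, hFaw (acc ++ [n])]
          rw [pvF, if_neg (by omega), pvFinalize, pvFinalize]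
          simp [hmeq]
    · rw [scanLoopA, if_neg h, pvF, if_neg h, pvFinalize]
      simp

-- ===== VERDICT (by name: the statement is the Claim_ definition above) =====
theorem scan_image_spec : Claim_equal_scan_image := by
  intro width height columns _ hpre
  obtain ⟨hw, hsep⟩ := hpre
  unfold Spec_scan_image
  rw [scan_image_alt_eq, scan_image,
    main_sim width height columns hw hsep (width.toNat + 1) 0 [] le_rfl (by omega)]
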